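-- pv_equiv track=rewrite | github.com/mullumaus/python | movingCount.py | getNumberSum
-- ===== SOURCE A (Python) =====
-- def getNumberSum(row,col):
--     res = 0
--     while row>0:
--         res += row % 10
--         row //= 10
--     while col>0:
--         res += col % 10
--         col //= 10
--     return res
-- ===== SOURCE B (Python) =====
-- def getNumberSum(row, col):
--     def digit_sum(n):
--         return sum(ord(c) - 48 for c in str(n)) if n > 0 else 0
--     return digit_sum(row) + digit_sum(col)
-- ===== Notes on version B (the rewrite author's own statement) =====
-- stated objective: simpler
-- what changed: Replaces the two arithmetic %/// extraction loops with summing the digit characters of str(n) for each positive argument.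
import Mathlib
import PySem

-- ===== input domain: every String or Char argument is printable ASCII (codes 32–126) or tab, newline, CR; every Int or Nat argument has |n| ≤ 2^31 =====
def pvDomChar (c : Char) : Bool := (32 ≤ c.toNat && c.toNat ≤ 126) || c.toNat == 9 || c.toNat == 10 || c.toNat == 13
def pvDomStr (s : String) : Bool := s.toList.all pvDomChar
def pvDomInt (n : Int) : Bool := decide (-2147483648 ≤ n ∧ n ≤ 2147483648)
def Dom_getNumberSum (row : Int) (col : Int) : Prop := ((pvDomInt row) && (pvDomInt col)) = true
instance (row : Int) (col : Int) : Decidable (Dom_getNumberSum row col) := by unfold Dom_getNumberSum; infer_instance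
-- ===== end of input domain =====

-- B replaces A's two arithmetic %/// extraction loops by summing the digit characters of str(n); objective: simpler.

-- ===== PORT A =====
-- 'while n > 0: res += n % 10; n //= 10' as structural recursion on the same state (n, res)
def pvDigitLoop (n : Int) (res : Int) : Int :=
  if _h : 0 < n then
    pvDigitLoop (PySem.Int.floordiv n 10) (res + PySem.Int.mod n 10)
  else res
termination_by n.toNat
decreasing_by
  rw [PySem.Int.floordiv_eq_ediv_of_pos (by omega : (0:Int) < 10)]
  omega

def getNumberSum (row : Int) (col : Int) : Int :=
  pvDigitLoop col (pvDigitLoop row 0)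

-- ===== PORT B =====
-- 'sum(ord(c) - 48 for c in str(n)) if n > 0 else 0'; ord(c) - 48 is exact on the digit chars str(n) yields
def pvDigitSumStr (n : Int) : Int :=
  if 0 < n then ((PySem.Int.toChars n).map (fun c => ((c.toNat : Int) - 48))).sum else 0

def getNumberSum_alt (row : Int) (col : Int) : Int :=
  pvDigitSumStr row + pvDigitSumStr col

-- ===== PRECONDITION & SPEC =====
def Spec_getNumberSum (row : Int) (col : Int) (out : Int) : Prop := out = getNumberSum_alt row col
instance (row : Int) (col : Int) (out : Int) : Decidable (Spec_getNumberSum row col out) := by unfold Spec_getNumberSum; infer_instance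

-- ===== CLAIM (what is proved, stated in full; the proofs are below) =====
def Claim_equal_getNumberSum : Prop := ∀ (row : Int) (col : Int), Dom_getNumberSum row col → Spec_getNumberSum row col (getNumberSum row col)

-- ===== LEMMAS AND PROOFS =====

-- the common mathematical value: the decimal digit sum of a natural number
def pvDsum (m : Nat) : Nat :=
  if m = 0 then 0 else m % 10 + pvDsum (m / 10)
termination_by m
decreasing_by omega

theorem pvDigitLoop_eq (k : Nat) : ∀ (n res : Int), n.toNat ≤ k →
    pvDigitLoop n res = res + (pvDsum n.toNat : Int) := by
  induction k with
  | zero =>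
    intro n res h
    rw [pvDigitLoop, pvDsum]
    simp only [show ¬ (0:Int) < n by omega, show n.toNat = 0 by omega]
    simp
  | succ k ih =>
    intro n res h
    rw [pvDigitLoop]
    by_cases hn : 0 < n
    · rw [dif_pos hn,
        PySem.Int.floordiv_eq_ediv_of_pos (by omega : (0:Int) < 10),
        PySem.Int.mod_eq_emod_of_pos (by omega : (0:Int) < 10),
        ih (n / 10) _ (by omega),
        show (n / 10).toNat = n.toNat / 10 from by omega]
      conv_rhs => rw [pvDsum]
      rw [if_neg (by omega : ¬ n.toNat = 0)]
      push_cast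
      omega
    · rw [dif_neg hn, pvDsum]
      rw [if_pos (by omega : n.toNat = 0)]
      simp

theorem pvCharSum_toDigitsCore (fuel : Nat) : ∀ (n : Nat) (ds : List Char), n < fuel →
    ((Nat.toDigitsCore 10 fuel n ds).map (fun c => ((c.toNat : Int) - 48))).sum
      = (pvDsum n : Int) + ((ds.map (fun c => ((c.toNat : Int) - 48))).sum) := by
  induction fuel with
  | zero => intro n ds h; omega
  | succ fuel ih =>
    intro n ds h
    rw [Nat.toDigitsCore]
    have hd : ((Nat.digitChar (n % 10)).toNat : Int) - 48 = ((n % 10 : Nat) : Int) := by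
      have h10 : n % 10 < 10 := Nat.mod_lt _ (by omega)
      interval_cases h : n % 10 <;> simp [Nat.digitChar]
    by_cases h0 : n / 10 = 0
    · simp only [h0, if_true, List.map_cons, List.sum_cons]
      rw [hd]
      conv_rhs => rw [pvDsum]
      by_cases hn0 : n = 0
      · simp [hn0]
      · rw [if_neg hn0, h0, pvDsum]
        simp
    · rw [if_neg h0, ih (n / 10) _ (by omega)]
      simp only [List.map_cons, List.sum_cons]
      rw [hd]
      conv_rhs => rw [pvDsum]
      rw [if_neg (by omega : ¬ n = 0)]
      push_cast
      ring

theorem pvDigitSumStr_eq (n : Int) : pvDigitSumStr n = (pvDsum n.toNat : Int) := by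
  unfold pvDigitSumStr
  by_cases hn : 0 < n
  · rw [if_pos hn]
    unfold PySem.Int.toChars
    rw [if_neg (by omega : ¬ n < 0)]
    unfold Nat.toDigits
    rw [pvCharSum_toDigitsCore (n.toNat + 1) n.toNat [] (by omega)]
    simp
  · rw [if_neg hn, pvDsum]
    rw [if_pos (by omega : n.toNat = 0)]
    simp

-- ===== VERDICT (by name: the statement is the Claim_ definition above) =====
theorem getNumberSum_spec : Claim_equal_getNumberSum := by
  intro row col _
  unfold Spec_getNumberSum getNumberSum getNumberSum_alt
  rw [pvDigitLoop_eq row.toNat row 0 le_rfl,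
      pvDigitLoop_eq col.toNat col _ le_rfl,
      pvDigitSumStr_eq, pvDigitSumStr_eq]
  ring
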